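-- pv_equiv track=rewrite | github.com/watagashi-uni/chunithm | info.py | group_by_difficulty
-- ===== SOURCE A (Python) =====
-- def group_by_difficulty(tuples_list):
--     grouped_dict = {}
--     for item in tuples_list:
--         # 假设元组的第三个元素是难度值
--         difficulty_value = item[2]
--         if difficulty_value not in grouped_dict:
--             grouped_dict[difficulty_value] = []
--         grouped_dict[difficulty_value].append(item)
--
--     # 对每个难度级别内的元组按照level（第二个元素）从大到小排序
--     for difficulty in grouped_dict:
--         grouped_dict[difficulty] = sorted(grouped_dict[difficulty], key=lambda x: x[1], reverse=True)
--
--     # 对字典的键进行排序，确保从大到小的顺序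
--     sorted_difficulties = sorted(grouped_dict.keys(), reverse=True)
--
--     # 创建一个新的排序后的字典
--     sorted_grouped_dict = {difficulty: grouped_dict[difficulty] for difficulty in sorted_difficulties}
--     return sorted_grouped_dict
-- ===== SOURCE B (Python) =====
-- def group_by_difficulty(tuples_list):
--     difficulties = sorted({t[2] for t in tuples_list}, reverse=True)
--     return {d: sorted([t for t in tuples_list if t[2] == d], key=lambda x: x[1], reverse=True)
--             for d in difficulties}
-- ===== Notes on version B (the rewrite author's own statement) =====
-- stated objective: simpler
-- what changed: Replaces A's four-phase dict pipeline (group into a dict, re-sort each group in place, sort the keys, rebuild a dict) by a single comprehension over the sorted distinct difficulties that builds each group directly by filtering and sorting.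
import Mathlib
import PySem

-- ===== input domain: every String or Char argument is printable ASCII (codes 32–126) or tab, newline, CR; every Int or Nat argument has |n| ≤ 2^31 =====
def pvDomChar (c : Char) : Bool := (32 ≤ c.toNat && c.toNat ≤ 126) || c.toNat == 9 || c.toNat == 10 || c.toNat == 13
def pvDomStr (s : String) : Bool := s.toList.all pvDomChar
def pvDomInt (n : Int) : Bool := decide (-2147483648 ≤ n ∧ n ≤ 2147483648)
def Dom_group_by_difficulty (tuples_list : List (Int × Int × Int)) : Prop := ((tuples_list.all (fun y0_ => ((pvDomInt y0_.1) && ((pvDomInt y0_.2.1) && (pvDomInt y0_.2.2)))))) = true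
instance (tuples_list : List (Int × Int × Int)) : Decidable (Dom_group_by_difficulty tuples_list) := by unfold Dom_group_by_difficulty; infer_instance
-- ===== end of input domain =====

-- B replaces A's group-then-sort-each-then-sort-keys dict pipeline by one pass over the sorted
-- distinct difficulties, building each group directly by filtering (alternative decomposition, same result).

-- ===== PORT A =====
def group_by_difficulty (tuples_list : List (Int × Int × Int)) : List (Int × List (Int × Int × Int)) :=
  let grouped := tuples_list.foldl (fun d item =>
      let d := if d.contains item.2.2 then d else d.insert item.2.2 []
      d.modify item.2.2 [] (fun l => l ++ [item])) PySem.Dict.empty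
  let grouped2 := grouped.keys.foldl (fun d k =>
      d.insert k (PySem.List.sorted (d.getD k []) (fun x => x.2.1) true)) grouped
  let sortedDiffs := PySem.List.sorted grouped2.keys (fun k => k) true
  (sortedDiffs.foldl (fun d k => d.insert k (grouped2.getD k [])) PySem.Dict.empty).items

-- ===== PORT B =====
def group_by_difficulty_alt (tuples_list : List (Int × Int × Int)) : List (Int × List (Int × Int × Int)) :=
  let difficulties := PySem.List.sorted (PySem.Set.ofList (tuples_list.map (fun t => t.2.2))) (fun k => k) true
  difficulties.map (fun d =>
    (d, PySem.List.sorted (tuples_list.filter (fun t => t.2.2 == d)) (fun x => x.2.1) true))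

-- ===== PRECONDITION & SPEC =====
def Spec_group_by_difficulty (tuples_list : List (Int × Int × Int)) (out : List (Int × List (Int × Int × Int))) : Prop := out = group_by_difficulty_alt tuples_list
instance (tuples_list : List (Int × Int × Int)) (out : List (Int × List (Int × Int × Int))) : Decidable (Spec_group_by_difficulty tuples_list out) := by unfold Spec_group_by_difficulty; infer_instance

-- ===== CLAIM (what is proved, stated in full; the proofs are below) =====
def Claim_equal_group_by_difficulty : Prop := ∀ (tuples_list : List (Int × Int × Int)), Dom_group_by_difficulty tuples_list → Spec_group_by_difficulty tuples_list (group_by_difficulty tuples_list)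

-- ===== LEMMAS AND PROOFS =====

-- A's "if absent insert [] then append" step is the plain modify-append step.
theorem pvStepA_eq (d : PySem.Dict Int (List (Int × Int × Int))) (t : Int × Int × Int) :
    (let d' := if d.contains t.2.2 then d else d.insert t.2.2 []
     d'.modify t.2.2 [] (fun l => l ++ [t])) = d.modify t.2.2 [] (fun l => l ++ [t]) := by
  by_cases h : d.contains t.2.2 = true
  · simp [h]
  · simp only [Bool.not_eq_true] at h
    simp only [h, Bool.false_eq_true, if_false, PySem.Dict.modify,
      PySem.Dict.getD_insert_self, PySem.Dict.insert_insert_self,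
      PySem.Dict.getD_of_not_contains d [] h]

theorem pvLoopA_eq (xs : List (Int × Int × Int)) (d : PySem.Dict Int (List (Int × Int × Int))) :
    xs.foldl (fun d item =>
      let d := if d.contains item.2.2 then d else d.insert item.2.2 []
      d.modify item.2.2 [] (fun l => l ++ [item])) d
    = xs.foldl (fun d t => d.modify t.2.2 [] (fun l => l ++ [t])) d := by
  simp only [pvStepA_eq]

-- value of A's grouping dict at any key: the filter of the input
theorem pvGroupedGetD (xs : List (Int × Int × Int)) (c : Int) :
    (xs.foldl (fun d t => d.modify t.2.2 [] (fun l => l ++ [t]))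
      (PySem.Dict.empty : PySem.Dict Int (List (Int × Int × Int)))).getD c []
    = xs.filter (fun t => t.2.2 == c) := by
  have h := PySem.Dict.getD_foldl_modify_append (xs.map (fun t => (t.2.2, t)))
    (PySem.Dict.empty : PySem.Dict Int (List (Int × Int × Int))) c
  rw [List.foldl_map] at h
  simpa [List.filter_map, Function.comp_def] using h

-- updating a Nodup set with its own members changes nothing
theorem pvUpdate_self (s : PySem.Set Int) : PySem.Set.update s s = s := by
  rw [PySem.Set.update_eq_append_filter]
  have : (PySem.Set.ofList s).filter (fun y => !PySem.Set.contains s y) = [] := by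
    apply List.filter_eq_nil_iff.mpr
    intro y hy
    have hmem : y ∈ s := (PySem.Set.mem_ofList s y).mp hy
    simp
    exact hmem
  rw [this, List.append_nil]

-- the re-sorting loop of A, over Nodup keys
theorem pvResortGetD :
    ∀ (ks : List Int) (d : PySem.Dict Int (List (Int × Int × Int))) (c : Int), ks.Nodup →
      (ks.foldl (fun d k => d.insert k (PySem.List.sorted (d.getD k []) (fun x => x.2.1) true)) d).getD c []
        = if c ∈ ks then PySem.List.sorted (d.getD c []) (fun x => x.2.1) true else d.getD c [] := by
  intro ks
  induction ks with
  | nil => intro d c _; simp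
  | cons k ks ih =>
      intro d c hnd
      have hk : k ∉ ks := (List.nodup_cons.mp hnd).1
      have hks : ks.Nodup := (List.nodup_cons.mp hnd).2
      simp only [List.foldl_cons]
      rw [ih _ c hks]
      by_cases hc : c ∈ ks
      · have hne : c ≠ k := fun h => hk (h ▸ hc)
        simp [hc, PySem.Dict.getD_insert_of_ne _ _ _ hne, List.mem_cons]
      · by_cases hck : c = k
        · subst hck
          simp [hc, PySem.Dict.getD_insert_self]
        · simp [hc, hck, PySem.Dict.getD_insert_of_ne _ _ _ hck, List.mem_cons]

theorem group_by_difficulty_spec_aux (xs : List (Int × Int × Int)) :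
    group_by_difficulty xs = group_by_difficulty_alt xs := by
  unfold group_by_difficulty group_by_difficulty_alt
  simp only []
  set grouped := xs.foldl (fun d item =>
      let d := if d.contains item.2.2 then d else d.insert item.2.2 []
      d.modify item.2.2 [] (fun l => l ++ [item]))
      (PySem.Dict.empty : PySem.Dict Int (List (Int × Int × Int))) with hgr
  have hgr' : grouped = xs.foldl (fun d t => d.modify t.2.2 [] (fun l => l ++ [t])) PySem.Dict.empty := by
    rw [hgr, pvLoopA_eq]
  -- keys of the grouping dict
  have hkeys : grouped.keys = PySem.Set.ofList (xs.map (fun t => t.2.2)) := by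
    rw [hgr']
    have := PySem.Dict.keys_foldl_modify_key xs (fun t => t.2.2) ([] : List (Int × Int × Int))
      (fun _ t l => l ++ [t]) (PySem.Dict.empty : PySem.Dict Int (List (Int × Int × Int)))
    simpa [PySem.Set.update_nil_left] using this
  have hkeysnd : grouped.keys.Nodup := by
    rw [hkeys]; exact PySem.Set.nodup_ofList _
  have hget : ∀ c, grouped.getD c [] = xs.filter (fun t => t.2.2 == c) := by
    intro c; rw [hgr']; exact pvGroupedGetD xs c
  set grouped2 := grouped.keys.foldl (fun d k =>
      d.insert k (PySem.List.sorted (d.getD k []) (fun x => x.2.1) true)) grouped with hg2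
  have hkeys2 : grouped2.keys = grouped.keys := by
    rw [hg2]
    have := PySem.Dict.keys_foldl_insert grouped.keys
      (fun d k => PySem.List.sorted (d.getD k []) (fun x => x.2.1) true) grouped
    rw [this, pvUpdate_self]
  have hget2 : ∀ c, c ∈ grouped.keys →
      grouped2.getD c [] = PySem.List.sorted (xs.filter (fun t => t.2.2 == c)) (fun x => x.2.1) true := by
    intro c hc
    rw [hg2, pvResortGetD grouped.keys grouped c hkeysnd, if_pos hc, hget]
  set sortedDiffs := PySem.List.sorted grouped2.keys (fun k => k) true with hsd
  have hsdnd : sortedDiffs.Nodup := by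
    have hperm := PySem.List.sorted_perm grouped2.keys (fun k => k) true
    exact hperm.nodup_iff.mpr (hkeys2 ▸ hkeysnd)
  -- final comprehension: items of a fresh-key insert loop
  have hitems := PySem.Dict.items_foldl_insert_fresh sortedDiffs (fun k => k)
    (fun k => grouped2.getD k []) (PySem.Dict.empty : PySem.Dict Int (List (Int × Int × Int)))
    (fun a _ => PySem.Dict.contains_empty a) (by simpa using hsdnd)
  rw [hitems]
  simp only [PySem.Dict.empty, List.nil_append]
  have hsd' : sortedDiffs = PySem.List.sorted (PySem.Set.ofList (xs.map (fun t => t.2.2))) (fun k => k) true := by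
    rw [hsd, hkeys2, hkeys]
  rw [hsd']
  apply List.map_congr_left
  intro k hk
  have hkmem : k ∈ grouped.keys := by
    rw [hkeys]
    exact (PySem.List.mem_sorted _ _ _ k).mp hk
  rw [hget2 k hkmem]

-- ===== VERDICT (by name: the statement is the Claim_ definition above) =====
theorem group_by_difficulty_spec : Claim_equal_group_by_difficulty := by
  intro xs _
  unfold Spec_group_by_difficulty
  exact group_by_difficulty_spec_aux xs
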